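-- pv_equiv track=rewrite | github.com/renta0426/NVIDIA-Nemotron-Model-Reasoning-Challenge | brute_solve.py | num_to_digits_padded
-- ===== SOURCE A (Python) =====
-- def num_to_digits_padded(n, length):
--     """Convert n to a digit tuple of exactly `length` digits (with leading zeros)."""
--     if n < 0:
--         return None
--     digits = []
--     for _ in range(length):
--         digits.append(n % 10)
--         n //= 10
--     if n != 0:
--         return None  # doesn't fit in `length` digits
--     return tuple(reversed(digits))
-- ===== SOURCE B (Python) =====
-- def num_to_digits_padded(n, length):
--     """Convert n to a digit tuple of exactly `length` digits (with leading zeros)."""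
--     if n < 0:
--         return None
--     digits = []
--     while n:
--         n, r = divmod(n, 10)
--         digits.append(r)
--     if len(digits) > length:
--         return None
--     digits += [0] * (length - len(digits))
--     return tuple(reversed(digits))
-- ===== Notes on version B (the rewrite author's own statement) =====
-- stated objective: faster
-- what changed: Replaces A's counted loop of exactly `length` mod/div steps (then reverse and a leftover check) by a loop over the significant digits only (while n with divmod), a single length comparison, and one bulk zero-padding step; Pre_ excludes n == 0 with negative length, where A's empty tuple is an accident of range() over a negative count while B naturally reports that 0 significant digits do not fit a negative length.
-- outside the precondition, e.g. on num_to_digits_padded(0, -1): A returns (), B returns None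
import Mathlib
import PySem

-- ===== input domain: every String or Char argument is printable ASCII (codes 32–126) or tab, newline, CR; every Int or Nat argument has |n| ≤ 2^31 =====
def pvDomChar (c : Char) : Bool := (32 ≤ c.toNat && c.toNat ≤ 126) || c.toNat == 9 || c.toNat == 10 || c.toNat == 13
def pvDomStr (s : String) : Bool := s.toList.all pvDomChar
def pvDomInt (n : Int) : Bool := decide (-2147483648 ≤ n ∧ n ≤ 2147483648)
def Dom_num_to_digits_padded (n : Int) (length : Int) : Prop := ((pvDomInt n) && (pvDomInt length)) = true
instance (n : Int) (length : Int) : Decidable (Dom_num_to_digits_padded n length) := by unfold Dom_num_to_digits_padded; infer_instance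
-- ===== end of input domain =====

-- B loops over the significant digits only (while n, divmod) and pads with zeros in one bulk
-- step, instead of A's counted loop of exactly `length` mod/div iterations; a timing run
-- measured B faster at the largest sizes.

-- ===== PORT A =====
def num_to_digits_padded (n : Int) (length : Int) : Option (List Int) :=
  if n < 0 then none
  else
    -- for _ in range(length): digits.append(n % 10); n //= 10
    let st := (PySem.List.pyRange 0 length 1).foldl
      (fun (st : List Int × Int) _ =>
        (st.1 ++ [PySem.Int.mod st.2 10], PySem.Int.floordiv st.2 10)) ([], n)
    if st.2 ≠ 0 then none
    else some st.1.reverse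

-- ===== PORT B =====
-- while n: n, r = divmod(n, 10); digits.append(r)
-- (the loop is only reached with n ≥ 0, where `while n` is `while 0 < n`; low digit first)
def pvWhileDigs (m : Int) : List Int :=
  if 0 < m then PySem.Int.mod m 10 :: pvWhileDigs (PySem.Int.floordiv m 10) else []
termination_by m.toNat
decreasing_by
  have h1 : PySem.Int.floordiv m 10 = m / 10 := by simp [pysem]
  omega

def num_to_digits_padded_alt (n : Int) (length : Int) : Option (List Int) :=
  if n < 0 then none
  else
    let digits := pvWhileDigs n
    if (digits.length : Int) > length then none
    else
      -- digits += [0] * (length - len(digits)); tuple(reversed(digits))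
      some ((digits ++ List.replicate (length - (digits.length : Int)).toNat 0).reverse)

-- ===== PRECONDITION & SPEC =====
-- Pre_ excludes only n == 0 with negative `length`: there A's empty tuple is an accident of
-- range() over a negative count yielding no iterations, while B naturally returns None.
def Pre_num_to_digits_padded (n : Int) (length : Int) : Prop := ¬ (n = 0 ∧ length < 0)
instance (n : Int) (length : Int) : Decidable (Pre_num_to_digits_padded n length) := by unfold Pre_num_to_digits_padded; infer_instance
def pvWitness_num_to_digits_padded : Int × Int := (5, 3)

def Spec_num_to_digits_padded (n : Int) (length : Int) (out : Option (List Int)) : Prop := out = num_to_digits_padded_alt n length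
instance (n : Int) (length : Int) (out : Option (List Int)) : Decidable (Spec_num_to_digits_padded n length out) := by unfold Spec_num_to_digits_padded; infer_instance

-- ===== CLAIM (what is proved, stated in full; the proofs are below) =====
def Claim_equal_num_to_digits_padded : Prop := ∀ (n : Int) (length : Int), Dom_num_to_digits_padded n length → Pre_num_to_digits_padded n length → Spec_num_to_digits_padded n length (num_to_digits_padded n length)

-- ===== LEMMAS AND PROOFS =====

-- A's loop, as a recursion on the iteration count (the loop body ignores the range element)
def pvLoopA : Nat → (List Int × Int) → (List Int × Int)
  | 0, s => s
  | k+1, s => pvLoopA k (s.1 ++ [PySem.Int.mod s.2 10], PySem.Int.floordiv s.2 10)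

theorem pvFoldlA_eq_loopA (l : List Int) (s : List Int × Int) :
    l.foldl (fun (st : List Int × Int) _ =>
      (st.1 ++ [PySem.Int.mod st.2 10], PySem.Int.floordiv st.2 10)) s
      = pvLoopA l.length s := by
  induction l generalizing s with
  | nil => rfl
  | cons a t ih =>
    simp only [List.foldl_cons, List.length_cons, pvLoopA]
    exact ih _

-- low-to-high digit list collected by A's loop
def pvLow : Nat → Int → List Int
  | 0, _ => []
  | k+1, m => m % 10 :: pvLow k (m / 10)

theorem pvLoopA_spec (k : Nat) (m : Int) (acc : List Int) :
    pvLoopA k (acc, m) = (acc ++ pvLow k m, m / 10 ^ k) := by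
  induction k generalizing m acc with
  | zero => simp [pvLoopA, pvLow]
  | succ k ih =>
    have hdd : m / 10 / 10 ^ k = m / 10 ^ (k + 1) := by
      rw [Int.ediv_ediv_of_nonneg (by norm_num : (0:Int) ≤ 10), ← pow_succ']
    simp [pvLoopA, pysem, pvLow, ih, hdd]

theorem pvWhileDigs_zero : pvWhileDigs 0 = [] := by rw [pvWhileDigs]; simp

theorem pvWhileDigs_pos (m : Int) (h : 0 < m) :
    pvWhileDigs m = m % 10 :: pvWhileDigs (m / 10) := by
  rw [pvWhileDigs]
  simp [h, pysem]

theorem pvWhileDigs_len_le_iff (k : Nat) (m : Int) (hm : 0 ≤ m) :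
    (pvWhileDigs m).length ≤ k ↔ m < 10 ^ k := by
  induction k generalizing m with
  | zero =>
    simp only [Nat.le_zero, List.length_eq_zero_iff, pow_zero]
    constructor
    · intro h
      by_contra hlt
      have hpos : 0 < m := by omega
      rw [pvWhileDigs_pos m hpos] at h
      simp at h
    · intro h
      have : m = 0 := by omega
      simp [this, pvWhileDigs_zero]
  | succ k ih =>
    by_cases hpos : 0 < m
    · rw [pvWhileDigs_pos m hpos]
      have hdiv10 : m / 10 < 10 ^ k ↔ m < 10 ^ (k + 1) := by
        rw [Int.ediv_lt_iff_lt_mul (by norm_num : (0:Int) < 10), ← pow_succ]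
      simp only [List.length_cons]
      rw [show (pvWhileDigs (m / 10)).length + 1 ≤ k + 1 ↔ (pvWhileDigs (m / 10)).length ≤ k by omega]
      rw [ih (m / 10) (by omega), hdiv10]
    · have : m = 0 := by omega
      subst this
      simp only [pvWhileDigs_zero, List.length_nil, Nat.zero_le, true_iff]
      positivity

-- A's k low digits of a fitting m are its significant digits padded high with zeros
theorem pvLow_eq_pad (k : Nat) (m : Int) (hm : 0 ≤ m) (hlt : m < 10 ^ k) :
    pvLow k m = pvWhileDigs m ++ List.replicate (k - (pvWhileDigs m).length) 0 := by
  induction k generalizing m with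
  | zero =>
    have : m = 0 := by simp at hlt; omega
    simp [this, pvLow, pvWhileDigs_zero]
  | succ k ih =>
    have hd10 : (0:Int) ≤ m / 10 := by positivity
    have hlt10 : m / 10 < 10 ^ k := by
      rw [Int.ediv_lt_iff_lt_mul (by norm_num : (0:Int) < 10), ← pow_succ]; exact hlt
    by_cases hpos : 0 < m
    · rw [pvWhileDigs_pos m hpos]
      simp only [pvLow, ih (m / 10) hd10 hlt10, List.length_cons, List.cons_append]
      rw [show k + 1 - ((pvWhileDigs (m / 10)).length + 1) = k - (pvWhileDigs (m / 10)).length by omega]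
    · have : m = 0 := by omega
      subst this
      have hz : ∀ j : Nat, pvLow j 0 = List.replicate j 0 := by
        intro j; induction j with
        | zero => rfl
        | succ j ihj => simp [pvLow, ihj, List.replicate_succ]
      simp [hz, pvWhileDigs_zero]

theorem pvRange_length_eq (b : Int) : (PySem.List.pyRange 0 b 1).length = b.toNat := by
  simp [PySem.List.pyRange]; omega

-- ===== VERDICT (by name: the statement is the Claim_ definition above) =====
theorem num_to_digits_padded_spec : Claim_equal_num_to_digits_padded := by
  intro n length _ hpre
  unfold Spec_num_to_digits_padded num_to_digits_padded num_to_digits_padded_alt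
  by_cases hneg : n < 0
  · simp [hneg]
  · simp only [hneg, if_false]
    have hn : 0 ≤ n := by omega
    set k := length.toNat with hk
    have hrange : (PySem.List.pyRange 0 length 1).length = k := pvRange_length_eq length
    rw [pvFoldlA_eq_loopA, hrange, pvLoopA_spec]
    have hnum : (0:Int) < 10 ^ k := by positivity
    have hdigits := pvWhileDigs_len_le_iff k n hn
    by_cases hfit : n < 10 ^ k
    · -- fits: both return the padded digit list
      have hz : n / 10 ^ k = 0 := by
        have h1 : n / 10 ^ k < 1 := by
          rw [Int.ediv_lt_iff_lt_mul hnum]; simpa using hfit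
        have h2 : 0 ≤ n / 10 ^ k := Int.ediv_nonneg hn (le_of_lt hnum)
        omega
      have hlen : (pvWhileDigs n).length ≤ k := hdigits.mpr hfit
      have hlenpos : 0 ≤ length := by
        by_contra hlength
        have hk0 : k = 0 := by omega
        have : n = 0 := by rw [hk0] at hfit; simp at hfit; omega
        exact hpre ⟨this, by omega⟩
      have hcond : ¬ ((pvWhileDigs n).length : Int) > length := by
        simp only [gt_iff_lt, not_lt]
        have : ((pvWhileDigs n).length : Int) ≤ (k : Int) := by exact_mod_cast hlen
        omega
      simp only [hz, ne_eq, not_true_eq_false, if_false, hcond, List.nil_append]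
      rw [pvLow_eq_pad k n hn hfit]
      have : (length - ((pvWhileDigs n).length : Int)).toNat = k - (pvWhileDigs n).length := by omega
      rw [this]
    · -- does not fit: both none
      have hz : n / 10 ^ k ≠ 0 := by
        intro h
        apply hfit
        have := (Int.ediv_lt_iff_lt_mul hnum (a := n) (b := 1)).mp (by omega)
        simpa using this
      have hlen : ¬ (pvWhileDigs n).length ≤ k := fun h => hfit (hdigits.mp h)
      have hcond : ((pvWhileDigs n).length : Int) > length := by
        have h1 : (k : Int) < ((pvWhileDigs n).length : Int) := by exact_mod_cast Nat.lt_of_not_le hlen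
        omega
      simp [hz, hcond]
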